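-- pv_equiv track=rewrite | github.com/jvasilakes/n2c2-track1 | helper_scripts/datastats.py | count_anns
-- ===== SOURCE A (Python) =====
-- from collections import Counter, defaultdict
--
-- def count_anns(anns_by_type):
--     tokens = []
--     E_counts = defaultdict(int)  # Count event types
--     A_counts = defaultdict(lambda: defaultdict(int))
--     for ann_type, anns in anns_by_type.items():
--         for ann in anns:
--             if ann_type == 'T':
--                 norm_text = ann["text"].lower()
--                 tokens.append(norm_text)
--             elif ann_type == 'E':
--                 E_counts[ann["label"]] += 1
--             elif ann_type == 'A':
--                 label = ann["label"]
--                 value = ann["label_value"]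
--                 A_counts[label][value] += 1
--     return tokens, E_counts, A_counts
-- ===== SOURCE B (Python) =====
-- from collections import defaultdict
--
-- def count_anns(anns_by_type):
--     # Group-and-count strategy: project out the key sequences, dedupe them in
--     # first-occurrence order (dict.fromkeys), and set each count with list.count,
--     # writing each dict entry exactly once per distinct key.
--     tokens = [ann["text"].lower() for ann in anns_by_type.get("T", [])]
--     e_labels = [ann["label"] for ann in anns_by_type.get("E", [])]
--     E_counts = defaultdict(int)
--     for lab in dict.fromkeys(e_labels):
--         E_counts[lab] = e_labels.count(lab)
--     a_pairs = [(ann["label"], ann["label_value"]) for ann in anns_by_type.get("A", [])]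
--     A_counts = defaultdict(lambda: defaultdict(int))
--     for lab in dict.fromkeys(lab for lab, _ in a_pairs):
--         vals = [v for l, v in a_pairs if l == lab]
--         inner = defaultdict(int)
--         for v in dict.fromkeys(vals):
--             inner[v] = vals.count(v)
--         A_counts[lab] = inner
--     return tokens, E_counts, A_counts
-- ===== Notes on version B (the rewrite author's own statement) =====
-- stated objective: alternative
-- what changed: Replaces A's single incremental pass that increments defaultdict counters per annotation by a group-and-count strategy: project out the label sequences, dedupe them in first-occurrence order with dict.fromkeys, and write each count once with list.count (and a filter per distinct label for the nested counts).
import Mathlib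
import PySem

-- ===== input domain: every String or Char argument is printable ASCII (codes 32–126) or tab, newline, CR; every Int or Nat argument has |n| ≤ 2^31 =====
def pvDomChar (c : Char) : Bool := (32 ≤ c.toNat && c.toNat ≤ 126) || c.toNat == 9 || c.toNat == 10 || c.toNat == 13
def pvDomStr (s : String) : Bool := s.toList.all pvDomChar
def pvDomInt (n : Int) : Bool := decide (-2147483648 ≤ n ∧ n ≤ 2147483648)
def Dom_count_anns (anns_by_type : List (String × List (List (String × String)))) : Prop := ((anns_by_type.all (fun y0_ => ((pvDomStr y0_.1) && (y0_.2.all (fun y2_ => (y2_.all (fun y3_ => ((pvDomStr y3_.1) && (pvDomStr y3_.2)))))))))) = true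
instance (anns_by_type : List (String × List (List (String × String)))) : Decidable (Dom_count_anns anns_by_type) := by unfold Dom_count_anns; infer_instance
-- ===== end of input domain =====

-- B replaces A's incremental dispatch-and-increment pass by a group-and-count strategy
-- (dedupe the projected keys in first-occurrence order, then set each count with list.count);
-- objective: alternative.

-- ===== PORT A =====
-- Literal port of A: one fold over the items, inner fold over each ann list with the
-- if/elif dispatch on the annotation type; counters are PySem.Dicts (defaultdict(int)
-- becomes modify with default 0). ann["text"] etc. is getD with default "": Pre_ below
-- excludes the missing-key inputs on which Python raises KeyError, so the default is never taken.
def count_anns (anns_by_type : List (String × List (List (String × String)))) : List String × (List (String × Int)) × (List (String × List (String × Int))) :=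
  let r := anns_by_type.foldl
    (fun s p => p.2.foldl
      (fun s ann =>
        if p.1 == "T" then
          (s.1 ++ [PySem.Str.lower (PySem.Dict.getD (PySem.Dict.ofList ann) "text" "")], s.2.1, s.2.2)
        else if p.1 == "E" then
          (s.1, PySem.Dict.modify s.2.1 (PySem.Dict.getD (PySem.Dict.ofList ann) "label" "") 0 (· + 1), s.2.2)
        else if p.1 == "A" then
          (s.1, s.2.1,
           PySem.Dict.modify s.2.2 (PySem.Dict.getD (PySem.Dict.ofList ann) "label" "") PySem.Dict.empty
             (fun inner => PySem.Dict.modify inner (PySem.Dict.getD (PySem.Dict.ofList ann) "label_value" "") 0 (· + 1)))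
        else s) s)
    (([] : List String), (PySem.Dict.empty : PySem.Dict String Int), (PySem.Dict.empty : PySem.Dict String (PySem.Dict String Int)))
  (r.1, r.2.1.items, r.2.2.items.map (fun q => (q.1, q.2.items)))

-- ===== PORT B =====
-- Port of Source B: project out the label sequences, dedupe in first-occurrence order
-- (dict.fromkeys = PySem.List.dedup) and write each count once with list.count.
def count_anns_alt (anns_by_type : List (String × List (List (String × String)))) : List String × (List (String × Int)) × (List (String × List (String × Int))) :=
  let d := PySem.Dict.mk anns_by_type
  let tokens := (d.getD "T" []).map
    (fun ann => PySem.Str.lower (PySem.Dict.getD (PySem.Dict.ofList ann) "text" ""))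
  let eLabels := (d.getD "E" []).map (fun ann => PySem.Dict.getD (PySem.Dict.ofList ann) "label" "")
  let eCounts := (PySem.List.dedup eLabels).foldl
    (fun ec lab => ec.insert lab ((eLabels.count lab : Int)))
    (PySem.Dict.empty : PySem.Dict String Int)
  let aPairs := (d.getD "A" []).map
    (fun ann => (PySem.Dict.getD (PySem.Dict.ofList ann) "label" "",
                 PySem.Dict.getD (PySem.Dict.ofList ann) "label_value" ""))
  let aCounts := (PySem.List.dedup (aPairs.map Prod.fst)).foldl
    (fun ac lab =>
      let vals := (aPairs.filter (fun p => p.1 == lab)).map Prod.snd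
      ac.insert lab ((PySem.List.dedup vals).foldl
        (fun ic v => ic.insert v ((vals.count v : Int)))
        (PySem.Dict.empty : PySem.Dict String Int)))
    (PySem.Dict.empty : PySem.Dict String (PySem.Dict String Int))
  (tokens, eCounts.items, aCounts.items.map (fun q => (q.1, q.2.items)))

-- ===== PRECONDITION & SPEC =====
-- The argument is a Python dict, so its keys are unique (the assoc-list model allows
-- duplicates Python cannot pass); and Python A raises KeyError when a 'T' ann lacks
-- "text", an 'E' ann lacks "label", or an 'A' ann lacks "label"/"label_value".
def Pre_count_anns (anns_by_type : List (String × List (List (String × String)))) : Prop :=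
  (anns_by_type.map Prod.fst).Nodup ∧
  ∀ p ∈ anns_by_type, ∀ ann ∈ p.2,
    (p.1 = "T" → "text" ∈ ann.map Prod.fst) ∧
    (p.1 = "E" → "label" ∈ ann.map Prod.fst) ∧
    (p.1 = "A" → "label" ∈ ann.map Prod.fst ∧ "label_value" ∈ ann.map Prod.fst)
instance (anns_by_type : List (String × List (List (String × String)))) : Decidable (Pre_count_anns anns_by_type) := by unfold Pre_count_anns; infer_instance

def pvWitness_count_anns : (List (String × List (List (String × String)))) :=
  [("T", [[("text", "Advil")]]), ("E", [[("label", "Disposition")]]),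
   ("A", [[("label", "Certainty"), ("label_value", "Certain")]])]

def Spec_count_anns (anns_by_type : List (String × List (List (String × String)))) (out : List String × (List (String × Int)) × (List (String × List (String × Int)))) : Prop := out = count_anns_alt anns_by_type
instance (anns_by_type : List (String × List (List (String × String)))) (out : List String × (List (String × Int)) × (List (String × List (String × Int)))) : Decidable (Spec_count_anns anns_by_type out) := by unfold Spec_count_anns; infer_instance

-- ===== CLAIM (what is proved, stated in full; the proofs are below) =====
def Claim_equal_count_anns : Prop := ∀ (anns_by_type : List (String × List (List (String × String)))), Dom_count_anns anns_by_type → Pre_count_anns anns_by_type → Spec_count_anns anns_by_type (count_anns anns_by_type)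

-- ===== LEMMAS AND PROOFS =====

-- Proof-only abbreviations for the three per-annotation actions (they are the literal
-- lambdas appearing in A's port).
def pvTok (ann : List (String × String)) : String :=
  PySem.Str.lower (PySem.Dict.getD (PySem.Dict.ofList ann) "text" "")
def pvE (ec : PySem.Dict String Int) (ann : List (String × String)) : PySem.Dict String Int :=
  PySem.Dict.modify ec (PySem.Dict.getD (PySem.Dict.ofList ann) "label" "") 0 (· + 1)
def pvA (ac : PySem.Dict String (PySem.Dict String Int)) (ann : List (String × String)) : PySem.Dict String (PySem.Dict String Int) :=
  PySem.Dict.modify ac (PySem.Dict.getD (PySem.Dict.ofList ann) "label" "") PySem.Dict.empty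
    (fun inner => PySem.Dict.modify inner (PySem.Dict.getD (PySem.Dict.ofList ann) "label_value" "") 0 (· + 1))

abbrev pvState : Type := List String × PySem.Dict String Int × PySem.Dict String (PySem.Dict String Int)

-- A's inner loop over one entry, per annotation type.
lemma pv_inner_char (t : String) (anns : List (List (String × String))) (s : pvState) :
    anns.foldl
      (fun s ann =>
        if t == "T" then (s.1 ++ [pvTok ann], s.2.1, s.2.2)
        else if t == "E" then (s.1, pvE s.2.1 ann, s.2.2)
        else if t == "A" then (s.1, s.2.1, pvA s.2.2 ann)
        else s) s
    = if t == "T" then (s.1 ++ anns.map pvTok, s.2.1, s.2.2)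
      else if t == "E" then (s.1, anns.foldl pvE s.2.1, s.2.2)
      else if t == "A" then (s.1, s.2.1, anns.foldl pvA s.2.2)
      else s := by
  induction anns generalizing s with
  | nil => split_ifs <;> simp
  | cons a rest ih =>
    simp only [List.foldl_cons, List.map_cons]
    by_cases h1 : t = "T" <;> by_cases h2 : t = "E" <;> by_cases h3 : t = "A" <;>
      simp [h1, h2, h3] at ih ⊢ <;> rw [ih] <;> simp

-- A's outer loop, characterized component-wise.
lemma pv_outer_char (l : List (String × List (List (String × String)))) (s : pvState) :
    l.foldl
      (fun s p => p.2.foldl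
        (fun s ann =>
          if p.1 == "T" then (s.1 ++ [pvTok ann], s.2.1, s.2.2)
          else if p.1 == "E" then (s.1, pvE s.2.1 ann, s.2.2)
          else if p.1 == "A" then (s.1, s.2.1, pvA s.2.2 ann)
          else s) s) s
    = (s.1 ++ ((l.filter (fun p => p.1 == "T")).flatMap (fun p => p.2)).map pvTok,
       ((l.filter (fun p => p.1 == "E")).flatMap (fun p => p.2)).foldl pvE s.2.1,
       ((l.filter (fun p => p.1 == "A")).flatMap (fun p => p.2)).foldl pvA s.2.2) := by
  induction l generalizing s with
  | nil => simp
  | cons p rest ih =>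
    simp only [List.foldl_cons]
    rw [pv_inner_char, ih]
    by_cases h1 : p.1 = "T" <;> by_cases h2 : p.1 = "E" <;> by_cases h3 : p.1 = "A" <;>
      simp_all

-- With unique keys, concatenating the values of all entries with key k is the dict lookup.
lemma pv_filter_getD (l : List (String × List (List (String × String)))) (k : String)
    (h : (l.map Prod.fst).Nodup) :
    ((l.filter (fun p => p.1 == k)).flatMap (fun p => p.2)) = (PySem.Dict.mk l).getD k [] := by
  induction l with
  | nil => simp [PySem.Dict.getD, PySem.Dict.get?]
  | cons p rest ih =>
    simp only [List.map_cons, List.nodup_cons] at h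
    rw [PySem.Dict.getD_eq_get?_getD, PySem.Dict.get?_mk_cons]
    by_cases hk : p.1 = k
    · subst hk
      have hnil : rest.filter (fun q => q.1 == p.1) = [] := by
        rw [List.filter_eq_nil_iff]
        intro q hq
        simp only [beq_iff_eq]
        intro hq1
        exact h.1 (hq1 ▸ List.mem_map_of_mem hq)
      simp [hnil]
    · have := ih h.2
      rw [PySem.Dict.getD_eq_get?_getD] at this
      simp [hk, this]

-- B's dedup-then-insert-count loop builds exactly Counter(xs).items.
lemma pv_dedup_insert_items (xs : List String) :
    ((PySem.List.dedup xs).foldl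
       (fun d k => d.insert k ((xs.count k : Int))) (PySem.Dict.empty : PySem.Dict String Int)).items
    = (PySem.Dict.counter xs).items := by
  have h := PySem.Dict.items_foldl_insert_fresh (l := PySem.List.dedup xs)
      (d := (PySem.Dict.empty : PySem.Dict String Int)) (k := fun a => a)
      (v := fun a => (xs.count a : Int)) (by intro a _; simp)
      (by simp)
  simp only [PySem.Dict.items_counter] at *
  simpa using h

-- A's E-counting fold over anns is Counter of the projected labels.
lemma pv_foldE_counter (anns : List (List (String × String))) :
    anns.foldl pvE PySem.Dict.empty
    = PySem.Dict.counter (anns.map (fun ann => PySem.Dict.getD (PySem.Dict.ofList ann) "label" "")) := by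
  rw [PySem.Dict.counter_eq_foldl, List.foldl_map]
  rfl

-- The nested modify fold, looked up at one outer key, is the value-counter fold of
-- the pairs carrying that key.
lemma pv_group_getD (ps : List (String × String)) (d : PySem.Dict String (PySem.Dict String Int)) (lab : String) :
    (ps.foldl (fun ac p => ac.modify p.1 PySem.Dict.empty
        (fun inner => inner.modify p.2 0 (· + 1))) d).getD lab PySem.Dict.empty
    = ((ps.filter (fun p => p.1 == lab)).map Prod.snd).foldl
        (fun ic v => ic.modify v 0 (· + 1)) (d.getD lab PySem.Dict.empty) := by
  induction ps generalizing d with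
  | nil => simp
  | cons p rest ih =>
    simp only [List.foldl_cons, List.filter_cons]
    by_cases hp : p.1 = lab
    · simp only [hp, beq_self_eq_true, if_true, List.map_cons, List.foldl_cons]
      rw [ih, PySem.Dict.getD_modify]
      simp
    · rw [if_neg (by simp [hp] : ¬ ((p.1 == lab) = true))]
      rw [ih, PySem.Dict.getD_modify, if_neg (fun h => hp h.symm)]

-- items (mapped to item lists) of A's grouped modify-fold equal those of B's
-- dedup-then-insert outer fold, over any projected pair list.
lemma pv_groupA_items (ps : List (String × String)) :
    ((ps.foldl (fun ac p => ac.modify p.1 PySem.Dict.empty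
        (fun inner => inner.modify p.2 0 (· + 1)))
        (PySem.Dict.empty : PySem.Dict String (PySem.Dict String Int))).items).map
      (fun q => (q.1, q.2.items))
    = (((PySem.List.dedup (ps.map Prod.fst)).foldl
        (fun ac lab =>
          let vals := (ps.filter (fun p => p.1 == lab)).map Prod.snd
          ac.insert lab ((PySem.List.dedup vals).foldl
            (fun ic v => ic.insert v ((vals.count v : Int))) PySem.Dict.empty))
        (PySem.Dict.empty : PySem.Dict String (PySem.Dict String Int))).items).map
      (fun q => (q.1, q.2.items)) := by
  have hnd : (ps.foldl (fun ac p => ac.modify p.1 PySem.Dict.empty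
      (fun inner => inner.modify p.2 0 (· + 1)))
      (PySem.Dict.empty : PySem.Dict String (PySem.Dict String Int))).keys.Nodup :=
    PySem.Dict.nodup_keys_foldl_modify_key ps Prod.fst PySem.Dict.empty
      (fun ac p => fun inner => inner.modify p.2 0 (· + 1)) PySem.Dict.empty (by simp)
  rw [PySem.Dict.items_eq_map_keys _ hnd PySem.Dict.empty,
      PySem.Dict.keys_foldl_modify_key]
  have hB := PySem.Dict.items_foldl_insert_fresh
      (l := PySem.List.dedup (ps.map Prod.fst))
      (d := (PySem.Dict.empty : PySem.Dict String (PySem.Dict String Int)))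
      (k := fun a => a)
      (v := fun lab =>
        (PySem.List.dedup ((ps.filter (fun p => p.1 == lab)).map Prod.snd)).foldl
          (fun ic v => ic.insert v (((((ps.filter (fun p => p.1 == lab)).map Prod.snd).count v : Int))))
          PySem.Dict.empty)
      (by intro a _; simp)
      (by simp)
  simp only [] at hB
  rw [hB]
  rw [show (PySem.Dict.empty : PySem.Dict String (PySem.Dict String Int)).items = [] from rfl]
  simp only [PySem.Dict.keys_empty, PySem.Set.update_nil_left, PySem.List.dedup_eq_ofList,
    List.nil_append, List.map_map]
  apply List.map_congr_left
  intro lab _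
  simp only [Function.comp]
  rw [pv_group_getD]
  simp only [PySem.Dict.getD_empty]
  congr 1
  have h := pv_dedup_insert_items ((ps.filter (fun p => p.1 == lab)).map Prod.snd)
  simp only [PySem.List.dedup_eq_ofList, PySem.Dict.counter_eq_foldl] at h
  exact h.symm

-- ===== VERDICT (by name: the statement is the Claim_ definition above) =====
theorem count_anns_spec : Claim_equal_count_anns := by
  intro l _ hpre
  unfold Spec_count_anns count_anns count_anns_alt
  have houter := pv_outer_char l ([], PySem.Dict.empty, PySem.Dict.empty)
  simp only [pvTok, pvE, pvA] at houter
  rw [houter, pv_filter_getD l "T" hpre.1, pv_filter_getD l "E" hpre.1,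
     pv_filter_getD l "A" hpre.1]
  simp only [List.nil_append, Prod.mk.injEq]
  refine ⟨rfl, ?_, ?_⟩
  · -- E component
    have := pv_foldE_counter ((PySem.Dict.mk l).getD "E" [])
    rw [this, ← pv_dedup_insert_items]
  · -- A component
    have hA : (((PySem.Dict.mk l).getD "A" []).foldl pvA PySem.Dict.empty)
        = (((PySem.Dict.mk l).getD "A" []).map
            (fun ann => (PySem.Dict.getD (PySem.Dict.ofList ann) "label" "",
                         PySem.Dict.getD (PySem.Dict.ofList ann) "label_value" ""))).foldl
            (fun ac p => ac.modify p.1 PySem.Dict.empty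
              (fun inner => inner.modify p.2 0 (· + 1))) PySem.Dict.empty := by
      rw [List.foldl_map]; rfl
    rw [hA, pv_groupA_items]
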